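-- pv_equiv track=rewrite | github.com/alexandraback/datacollection | solutions_5690574640250880_0/Python/Kbo/minesweeper.py | display_grid_free_top_left_rectangle
-- ===== SOURCE A (Python) =====
-- divisors_under_50 = [[], [], [], [2], [], [2], [], [4], [3], [2], [], [2, 3], [], [2], [3], [2, 4], [], [2, 3], [], [2, 4], [3], [2], [], [2, 3, 4], [5], [2], [3], [2, 4], [], [2, 3, 5], [], [2, 4], [3], [2], [5], [2, 3, 4, 6], [], [2], [3], [2, 4, 5], [], [2, 3, 6], [], [2, 4], [3, 5], [2], [], [2, 3, 4, 6], [7], [2, 5]]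
--
-- def display_grid_free_top_left_rectangle(m, h, w):
--
--     divisors = divisors_under_50[h*w - m - 1]
--     for divisor in divisors:
--         a = divisor
--         b = int((h*w-m)/a)
--         if a < h and b < w:
--             a, b = b, a
--         if a >= w or b >= h:
--             continue
--         res = ""
--         for i in range(0, h):
--             for j in range(0, w):
--                 res += "*" if i >= b or j >= a else "."
--             res += "\n"
--         return "c" +res[1:len(res)-1]
--     return "Impossible"
-- ===== SOURCE B (Python) =====
-- divisors_under_50 = [[], [], [], [2], [], [2], [], [4], [3], [2], [], [2, 3], [], [2], [3], [2, 4], [], [2, 3], [], [2, 4], [3], [2], [], [2, 3, 4], [5], [2], [3], [2, 4], [], [2, 3, 5], [], [2, 4], [3], [2], [5], [2, 3, 4, 6], [], [2], [3], [2, 4, 5], [], [2, 3, 6], [], [2, 4], [3, 5], [2], [], [2, 3, 4, 6], [7], [2, 5]]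
--
-- def display_grid_free_top_left_rectangle(m, h, w):
--     total = h * w - m
--     for a in divisors_under_50[total - 1]:
--         b = int(total / a)
--         if a < h and b < w:
--             a, b = b, a
--         if a >= w or b >= h:
--             continue
--         # build whole rows at once: a free cells padded with mines to width w
--         free_row = ('.' * a).ljust(w, '*')
--         rows = [free_row if i < b else '*' * w for i in range(h)]
--         return "c" + "\n".join(rows)[1:]
--     return "Impossible"
-- ===== Notes on version B (the rewrite author's own statement) =====
-- stated objective: simpler
-- what changed: The nested per-cell loop with per-cell '*'/'.' conditionals is replaced by per-row construction: each free row is built in closed form by string repetition plus ljust padding, rows are joined with '\n', and the corner/trailing-newline fixup becomes 'c' + joined[1:].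
import Mathlib
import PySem

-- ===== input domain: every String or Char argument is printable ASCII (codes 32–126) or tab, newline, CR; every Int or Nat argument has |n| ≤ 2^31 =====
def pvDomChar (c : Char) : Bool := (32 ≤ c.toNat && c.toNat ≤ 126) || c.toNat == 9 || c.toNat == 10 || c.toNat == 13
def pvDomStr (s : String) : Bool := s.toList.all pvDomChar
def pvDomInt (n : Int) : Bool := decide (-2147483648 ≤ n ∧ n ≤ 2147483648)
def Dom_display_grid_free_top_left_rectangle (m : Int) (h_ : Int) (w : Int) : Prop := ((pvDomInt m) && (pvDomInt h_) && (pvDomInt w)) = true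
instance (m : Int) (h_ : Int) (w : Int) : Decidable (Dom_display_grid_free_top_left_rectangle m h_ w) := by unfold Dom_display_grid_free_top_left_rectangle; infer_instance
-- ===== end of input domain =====

-- B replaces A's per-cell nested loop by closed-form row construction ('.'*a padded with '*' via ljust, rows joined by '\n'); objective: simpler.

-- ===== PORT A =====
def pvTable : List (List Int) := [[], [], [], [2], [], [2], [], [4], [3], [2], [], [2, 3], [], [2], [3], [2, 4], [], [2, 3], [], [2, 4], [3], [2], [], [2, 3, 4], [5], [2], [3], [2, 4], [], [2, 3, 5], [], [2, 4], [3], [2], [5], [2, 3, 4, 6], [], [2], [3], [2, 4, 5], [], [2, 3, 6], [], [2, 4], [3, 5], [2], [], [2, 3, 4, 6], [7], [2, 5]]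

-- the nested per-cell loop of A, over List Char (res += "*" / "." / "\n")
def pvCellsA (a b h_ w : Int) : List Char :=
  (PySem.List.pyRange 0 h_ 1).foldl (fun res i =>
    ((PySem.List.pyRange 0 w 1).foldl
        (fun r j => r ++ [if i ≥ b || j ≥ a then '*' else '.']) res) ++ ['\n']) []

-- the divisor loop of A ('continue' = recurse on the rest)
def pvLoopA (m h_ w : Int) : List Int → String
  | [] => "Impossible"
  | d :: rest =>
    let a := d
    -- int((h*w-m)/a): numerator is at most 50 in absolute value wherever the loop runs,
    -- so the float division is exact and int() truncates toward zero = Int.tdiv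
    let b := (h_ * w - m).tdiv a
    let p := if a < h_ && b < w then (b, a) else (a, b)
    if p.1 ≥ w || p.2 ≥ h_ then pvLoopA m h_ w rest
    else
      let res := pvCellsA p.1 p.2 h_ w
      -- "c" + res[1:len(res)-1]
      String.ofList ('c' :: PySem.List.slice res (some 1) (some ((res.length : Int) - 1)))

def display_grid_free_top_left_rectangle (m : Int) (h_ : Int) (w : Int) : String :=
  match PySem.List.pyGet? pvTable (h_ * w - m - 1) with
  | none => ""            -- IndexError in Python; excluded by Pre_
  | some divisors => pvLoopA m h_ w divisors

-- ===== PORT B =====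
-- '.' * n (empty for n ≤ 0; exact Python repetition for a single char)
def pvRepeat (c : Char) (n : Int) : List Char := List.replicate n.toNat c

-- s.ljust(w, fill): pad on the right to width w, unchanged if w ≤ len(s) (exact)
def pvLjust (s : List Char) (w : Int) (fill : Char) : List Char :=
  s ++ List.replicate (w - (s.length : Int)).toNat fill

-- [free_row if i < b else '*'*w for i in range(h)]
def pvRowsB (freeRow : List Char) (b h_ w : Int) : List (List Char) :=
  (PySem.List.pyRange 0 h_ 1).map (fun i => if i < b then freeRow else pvRepeat '*' w)

def pvLoopB (m h_ w : Int) : List Int → String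
  | [] => "Impossible"
  | d :: rest =>
    let total := h_ * w - m
    let a := d
    let b := total.tdiv a
    let p := if a < h_ && b < w then (b, a) else (a, b)
    if p.1 ≥ w || p.2 ≥ h_ then pvLoopB m h_ w rest
    else
      let freeRow := pvLjust (pvRepeat '.' p.1) w '*'
      let joined := PySem.Chars.join ['\n'] (pvRowsB freeRow p.2 h_ w)
      -- "c" + "\n".join(rows)[1:]
      String.ofList ('c' :: PySem.List.slice joined (some 1) none)

def display_grid_free_top_left_rectangle_alt (m : Int) (h_ : Int) (w : Int) : String :=
  match PySem.List.pyGet? pvTable (h_ * w - m - 1) with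
  | none => ""
  | some divisors => pvLoopB m h_ w divisors

-- ===== PRECONDITION & SPEC =====
-- A raises IndexError exactly when the table index h*w-m-1 is outside [-50, 50); Pre_ excludes only those.
def Pre_display_grid_free_top_left_rectangle (m : Int) (h_ : Int) (w : Int) : Prop :=
  -50 ≤ h_ * w - m - 1 ∧ h_ * w - m - 1 < 50
instance (m : Int) (h_ : Int) (w : Int) : Decidable (Pre_display_grid_free_top_left_rectangle m h_ w) := by unfold Pre_display_grid_free_top_left_rectangle; infer_instance

def pvWitness_display_grid_free_top_left_rectangle : Int × Int × Int := (2, 3, 3)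

def Spec_display_grid_free_top_left_rectangle (m : Int) (h_ : Int) (w : Int) (out : String) : Prop := out = display_grid_free_top_left_rectangle_alt m h_ w
instance (m : Int) (h_ : Int) (w : Int) (out : String) : Decidable (Spec_display_grid_free_top_left_rectangle m h_ w out) := by unfold Spec_display_grid_free_top_left_rectangle; infer_instance

-- ===== CLAIM (what is proved, stated in full; the proofs are below) =====
def Claim_equal_display_grid_free_top_left_rectangle : Prop := ∀ (m : Int) (h_ : Int) (w : Int), Dom_display_grid_free_top_left_rectangle m h_ w → Pre_display_grid_free_top_left_rectangle m h_ w → Spec_display_grid_free_top_left_rectangle m h_ w (display_grid_free_top_left_rectangle m h_ w)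

-- ===== LEMMAS AND PROOFS =====

-- inner "res += cell" loop: a foldl appending singletons is init ++ map
theorem pv_foldl_snoc {A B : Type} (l : List A) (f : A → B) (init : List B) :
    l.foldl (fun r j => r ++ [f j]) init = init ++ l.map f := by
  induction l generalizing init with
  | nil => simp
  | cons x t ih => simp [List.foldl_cons, ih]

-- the whole nested loop of A flattens the per-row strings (each ending in '\n')
theorem pv_cellsA_eq (a b h_ w : Int) :
    pvCellsA a b h_ w =
      ((PySem.List.pyRange 0 h_ 1).map (fun i =>
        (PySem.List.pyRange 0 w 1).map (fun j => if i ≥ b || j ≥ a then '*' else '.') ++ ['\n'])).flatten := by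
  unfold pvCellsA
  generalize (PySem.List.pyRange 0 h_ 1) = l
  suffices h : ∀ (init : List Char),
      l.foldl (fun res i =>
        ((PySem.List.pyRange 0 w 1).foldl (fun r j => r ++ [if i ≥ b || j ≥ a then '*' else '.']) res) ++ ['\n']) init
      = init ++ (l.map (fun i =>
        (PySem.List.pyRange 0 w 1).map (fun j => if i ≥ b || j ≥ a then '*' else '.') ++ ['\n'])).flatten by
    simpa using h []
  induction l with
  | nil => simp
  | cons x t ih =>
    intro init
    rw [List.foldl_cons, ih, pv_foldl_snoc]
    simp

-- a row at i ≥ b is all mines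
theorem pv_row_stars (a b w i : Int) (hib : b ≤ i) :
    (PySem.List.pyRange 0 w 1).map (fun j => if i ≥ b || j ≥ a then '*' else '.') = pvRepeat '*' w := by
  have hmap : ∀ j ∈ PySem.List.pyRange 0 w 1,
      (if i ≥ b || j ≥ a then '*' else '.') = '*' := by
    intro j _; simp [ge_iff_le, hib]
  rw [List.map_congr_left hmap]
  simp [pvRepeat, List.map_const', PySem.List.length_pyRange_one]

-- dots then stars, elementwise
theorem pv_map_range_if (a : Int) (n : Nat) (han : a.toNat ≤ n) :
    (List.range n).map (fun (k : Nat) => if a ≤ (k : Int) then '*' else '.') =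
      List.replicate a.toNat '.' ++ List.replicate (n - a.toNat) '*' := by
  apply List.ext_getElem
  · simp; omega
  · intro k hk1 hk2
    simp only [List.getElem_map, List.getElem_range, List.getElem_append,
      List.length_replicate, List.getElem_replicate]
    split_ifs with h1 h2 h2 <;> first | rfl | omega

-- a row at i < b is dots then stars, which is exactly ('.'*a).ljust(w,'*') when a < w
theorem pv_row_free (a b w i : Int) (haw : a < w) (hib : i < b) :
    (PySem.List.pyRange 0 w 1).map (fun j => if i ≥ b || j ≥ a then '*' else '.') =
      pvLjust (pvRepeat '.' a) w '*' := by
  rw [PySem.List.pyRange_one, List.map_map]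
  have hfun : ∀ k ∈ List.range (w - 0).toNat,
      ((fun j => if i ≥ b || j ≥ a then '*' else '.') ∘ fun k : Nat => (0 : Int) + (k : Int)) k
        = (fun (k : Nat) => if a ≤ (k : Int) then '*' else '.') k := by
    intro k _
    have hb : ¬ (i ≥ b) := by omega
    simp [hb, ge_iff_le]
  rw [List.map_congr_left hfun, pv_map_range_if a ((w - 0).toNat) (by omega)]
  unfold pvLjust pvRepeat
  have hlen : ((w : Int) - ((List.replicate a.toNat '.').length : Int)).toNat
      = (w - 0).toNat - a.toNat := by
    simp; omega
  rw [hlen]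

-- flatten of rows-with-trailing-newline vs '\n'.join
theorem pv_join_flat (rows : List (List Char)) :
    (rows.map (· ++ ['\n'])).flatten =
      if rows = [] then [] else PySem.Chars.join ['\n'] rows ++ ['\n'] := by
  induction rows with
  | nil => simp
  | cons r t ih =>
    cases t with
    | nil => simp [PySem.Chars.join_singleton]
    | cons r2 t2 =>
      have ht : (r2 :: t2 : List (List Char)) ≠ [] := by simp
      rw [List.map_cons, List.flatten_cons, ih, if_neg ht, if_neg (by simp),
        PySem.Chars.join_cons_cons]
      simp

-- res[1:len(res)-1] on join ++ ['\n'] equals join[1:]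
theorem pv_slice_eq (j : List Char) :
    PySem.List.slice (j ++ ['\n']) (some 1) (some (((j ++ ['\n']).length : Int) - 1)) =
      PySem.List.slice j (some 1) none := by
  rw [PySem.List.slice_from_one]
  have hb : (((j ++ ['\n']).length : Int) - 1) = ((j.length : Nat) : Int) := by simp
  rw [hb]
  have h1 : (1 : Int) = ((1 : Nat) : Int) := by norm_num
  rw [h1, PySem.List.slice_natCast]
  cases j with
  | nil => simp
  | cons x t => simp

-- the grid part of the two return values agrees whenever the chosen a is < w
theorem pv_grid_eq (a b h_ w : Int) (haw : a < w) :
    PySem.List.slice (pvCellsA a b h_ w) (some 1) (some (((pvCellsA a b h_ w).length : Int) - 1)) =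
      PySem.List.slice (PySem.Chars.join ['\n'] (pvRowsB (pvLjust (pvRepeat '.' a) w '*') b h_ w)) (some 1) none := by
  have hrows : (PySem.List.pyRange 0 h_ 1).map (fun i =>
        (PySem.List.pyRange 0 w 1).map (fun j => if i ≥ b || j ≥ a then '*' else '.'))
      = pvRowsB (pvLjust (pvRepeat '.' a) w '*') b h_ w := by
    unfold pvRowsB
    apply List.map_congr_left
    intro i _
    by_cases hib : i < b
    · rw [pv_row_free a b w i haw hib]; simp [hib]
    · rw [pv_row_stars a b w i (by omega)]; simp [hib]
  have hcells : pvCellsA a b h_ w =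
      ((pvRowsB (pvLjust (pvRepeat '.' a) w '*') b h_ w).map (· ++ ['\n'])).flatten := by
    rw [pv_cellsA_eq, ← hrows, List.map_map]
    rfl
  rw [hcells, pv_join_flat]
  by_cases hnil : pvRowsB (pvLjust (pvRepeat '.' a) w '*') b h_ w = []
  · rw [if_pos hnil, hnil, PySem.Chars.join_nil, PySem.List.slice_from_one]
    simp [PySem.List.slice]
  · rw [if_neg hnil]
    exact pv_slice_eq _

-- the two divisor loops agree element by element
theorem pv_loops_eq (m h_ w : Int) (ds : List Int) : pvLoopA m h_ w ds = pvLoopB m h_ w ds := by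
  induction ds with
  | nil => rfl
  | cons d rest ih =>
    show pvLoopA m h_ w (d :: rest) = pvLoopB m h_ w (d :: rest)
    unfold pvLoopA pvLoopB
    simp only
    set p := if d < h_ && (h_ * w - m).tdiv d < w then ((h_ * w - m).tdiv d, d) else (d, (h_ * w - m).tdiv d) with hp
    by_cases hg : (decide (p.1 ≥ w) || decide (p.2 ≥ h_)) = true
    · rw [if_pos hg, if_pos hg]
      exact ih
    · rw [if_neg hg, if_neg hg]
      have haw : p.1 < w := by
        simp only [Bool.or_eq_true, decide_eq_true_eq, not_or, ge_iff_le, not_le] at hg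
        exact hg.1
      exact congrArg String.ofList (congrArg (List.cons 'c') (pv_grid_eq p.1 p.2 h_ w haw))


-- ===== VERDICT (by name: the statement is the Claim_ definition above) =====
theorem display_grid_free_top_left_rectangle_spec : Claim_equal_display_grid_free_top_left_rectangle := by
  intro m h_ w _hdom _hpre
  unfold Spec_display_grid_free_top_left_rectangle
  unfold display_grid_free_top_left_rectangle display_grid_free_top_left_rectangle_alt
  cases PySem.List.pyGet? pvTable (h_ * w - m - 1) with
  | none => rfl
  | some divisors => exact pv_loops_eq m h_ w divisors
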